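-- pv_equiv track=rewrite | github.com/swarnaHub/System-1.x | src_maze/decomp_hybrid.py | format_system1_plan
-- ===== SOURCE A (Python) =====
-- def format_system1_plan(plan):
--     formatted_plan = ""
--     prev_state = None
--     plan_so_far = []
--     for i, step in enumerate(plan.split(" | ")):
--         action = step.split(" ")[0]
--         state = step[len(action):].strip()
--         if i == 0:
--             formatted_plan += f"Moved to state {state} | Plan so far {plan_so_far}"
--         else:
--             plan_so_far = plan_so_far + [f'{action}']
--             formatted_plan += f" | Taking action '{action}' from state {prev_state} | Moved to state {state} | Plan so far {plan_so_far}"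
--
--         prev_state = state
--
--     formatted_plan += f" | Goal state {prev_state} reached!"
--
--     return formatted_plan
-- ===== SOURCE B (Python) =====
-- def format_system1_plan(plan):
--     steps = plan.split(" | ")
--     actions = [s.split(" ")[0] for s in steps]
--     states = [s[len(a):].strip() for s, a in zip(steps, actions)]
--     parts = [f"Moved to state {states[0]} | Plan so far []"]
--     for i in range(1, len(steps)):
--         parts.append(f" | Taking action '{actions[i]}' from state {states[i-1]}"
--                      f" | Moved to state {states[i]} | Plan so far {actions[1:i+1]}")
--     parts.append(f" | Goal state {states[-1]} reached!")
--     return "".join(parts)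
-- ===== Notes on version B (the rewrite author's own statement) =====
-- stated objective: alternative
-- what changed: A builds the output in one loop with three incremental accumulators (growing string, prev_state, plan_so_far); B first parses the plan into actions/states tables, then formats each segment by index using states[i-1] and the slice actions[1:i+1], and joins the segments at the end.
import Mathlib
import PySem

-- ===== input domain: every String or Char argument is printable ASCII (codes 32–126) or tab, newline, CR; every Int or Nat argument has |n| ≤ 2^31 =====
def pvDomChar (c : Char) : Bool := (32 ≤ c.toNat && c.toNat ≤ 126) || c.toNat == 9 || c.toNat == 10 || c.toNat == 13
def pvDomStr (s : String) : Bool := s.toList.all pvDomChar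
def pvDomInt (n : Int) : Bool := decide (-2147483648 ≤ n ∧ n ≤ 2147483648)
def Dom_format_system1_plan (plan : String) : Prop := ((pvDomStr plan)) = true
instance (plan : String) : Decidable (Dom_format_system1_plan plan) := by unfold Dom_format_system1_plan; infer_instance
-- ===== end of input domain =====

-- B replaces A's three incremental accumulators with a parse pass into actions/states tables
-- followed by index/slice-based formatting of the segments; same output, similar cost (alternative).


-- Shared helpers for Python built-ins not covered by PySem:
-- Python's repr of a str, exact on the Dom alphabet (printable ASCII plus tab/newline/CR):
-- single quotes unless the string contains ' and no "; backslash, the quote, \t, \n, \r escaped.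
def pyReprQuote (cs : List Char) : Char :=
  if cs.contains '\'' && !(cs.contains '"') then '"' else '\''
def pyReprEsc (q c : Char) : List Char :=
  if c = '\\' then ['\\', '\\']
  else if c = q then ['\\', q]
  else if c = '\t' then ['\\', 't']
  else if c = '\n' then ['\\', 'n']
  else if c = '\r' then ['\\', 'r']
  else [c]
def pyStrRepr (s : String) : String :=
  let cs := s.toList
  let q := pyReprQuote cs
  String.ofList ([q] ++ cs.flatMap (pyReprEsc q) ++ [q])
-- Python's str(list-of-str), as used by f"{plan_so_far}"
def pyListRepr (xs : List String) : String :=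
  "[" ++ PySem.Str.join ", " (xs.map pyStrRepr) ++ "]"
-- s.split(sep) for the nonempty literal separators used here (split? is none only for sep = "")
def pySplit (s sep : String) : List String := (PySem.Str.split? s sep).getD []
-- f"{o}" for an Optional[str]
def pyOptStr (o : Option String) : String := match o with | none => "None" | some s => s

-- ===== PORT A =====
-- loop body of A: state is (formatted_plan, prev_state, plan_so_far), input (i, step)
def fspStep (acc : String × Option String × List String) (p : Int × String) :
    String × Option String × List String :=
  let action := PySem.List.pyGetD (pySplit p.2 " ") 0 ""   -- split(" ")[0]; split is never empty
  let state := PySem.Str.strip (PySem.Str.slice p.2 (some (PySem.Str.len action)) none)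
  if p.1 == 0 then
    (acc.1 ++ ("Moved to state " ++ (state ++ (" | Plan so far " ++ pyListRepr acc.2.2))),
     some state, acc.2.2)
  else
    let psf := acc.2.2 ++ [action]
    (acc.1 ++ (" | Taking action '" ++ (action ++ ("' from state " ++
       (pyOptStr acc.2.1 ++ (" | Moved to state " ++
       (state ++ (" | Plan so far " ++ pyListRepr psf))))))),
     some state, psf)

def format_system1_plan (plan : String) : String :=
  let r := (PySem.List.enumerate (pySplit plan " | ")).foldl fspStep ("", none, [])
  r.1 ++ (" | Goal state " ++ (pyOptStr r.2.1 ++ " reached!"))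

-- ===== PORT B =====
def pvAct (s : String) : String := PySem.List.pyGetD (pySplit s " ") 0 ""
def pvSt (p : String × String) : String :=
  PySem.Str.strip (PySem.Str.slice p.1 (some (PySem.Str.len p.2)) none)

def format_system1_plan_alt (plan : String) : String :=
  let steps := pySplit plan " | "
  let actions := steps.map pvAct
  let states := (steps.zip actions).map pvSt
  let mids := (PySem.List.pyRange 1 (steps.length : Int) 1).map (fun i =>
    " | Taking action '" ++ (PySem.List.pyGetD actions i "" ++ ("' from state " ++
      (PySem.List.pyGetD states (i - 1) "" ++ (" | Moved to state " ++
      (PySem.List.pyGetD states i "" ++ (" | Plan so far " ++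
      pyListRepr (PySem.List.slice actions (some 1) (some (i + 1))))))))))
  PySem.Str.join ""
    ((("Moved to state " ++ (PySem.List.pyGetD states 0 "" ++ " | Plan so far []")) :: mids)
      ++ [" | Goal state " ++ (PySem.List.pyGetD states (-1) "" ++ " reached!")])

-- ===== PRECONDITION & SPEC =====
def Spec_format_system1_plan (plan : String) (out : String) : Prop := out = format_system1_plan_alt plan
instance (plan : String) (out : String) : Decidable (Spec_format_system1_plan plan out) := by unfold Spec_format_system1_plan; infer_instance

-- ===== CLAIM (what is proved, stated in full; the proofs are below) =====
def Claim_equal_format_system1_plan : Prop := ∀ (plan : String), Dom_format_system1_plan plan → Spec_format_system1_plan plan (format_system1_plan plan)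

-- ===== LEMMAS AND PROOFS =====

-- the state of a step, as both programs compute it
def stOf (s : String) : String := pvSt (s, pvAct s)

-- one middle segment of the output
def segStr (a prev st : String) (psf : List String) : String :=
  " | Taking action '" ++ (a ++ ("' from state " ++ (prev ++ (" | Moved to state " ++
    (st ++ (" | Plan so far " ++ pyListRepr psf))))))

-- concatenation of all middle segments for the remaining steps
def tailStr : String → List String → List String → String
  | _, _, [] => ""
  | prev, psf, s :: r =>
      segStr (pvAct s) prev (stOf s) (psf ++ [pvAct s]) ++ tailStr (stOf s) (psf ++ [pvAct s]) r

-- the final state after the remaining steps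
def lastSt (prev : String) (l : List String) : String := l.foldl (fun _ s => stOf s) prev

theorem splitOn_go_ne_nil (sep : List Char) (fuel : Nat) :
    ∀ (s cur : List Char) (acc : List (List Char)),
      PySem.Chars.splitOn.go sep fuel s cur acc ≠ [] := by
  induction fuel with
  | zero => intro s cur acc; simp [PySem.Chars.splitOn.go]
  | succ n ih =>
      intro s cur acc
      cases s with
      | nil => simp [PySem.Chars.splitOn.go]
      | cons c rest =>
          simp only [PySem.Chars.splitOn.go]
          split
          · exact ih _ _ _
          · exact ih _ _ _

theorem pySplit_ne_nil (s sep : String) (hsep : sep.toList.isEmpty = false) :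
    pySplit s sep ≠ [] := by
  simp only [pySplit, PySem.Str.split?, PySem.Chars.split?, hsep]
  simp [PySem.Chars.splitOn]
  exact splitOn_go_ne_nil _ _ _ _ _

theorem join_empty_cons (x : String) (l : List String) :
    PySem.Str.join "" (x :: l) = x ++ PySem.Str.join "" l := by
  cases l with
  | nil => simp [PySem.Str.join, PySem.Chars.join_singleton, PySem.Chars.join_nil]
  | cons y r => simp [PySem.Str.join, PySem.Chars.join_cons_cons]

theorem foldA (rest : List String) :
    ∀ (j : Int) (f prev : String) (psf : List String), 1 ≤ j →
      (PySem.List.enumerate rest j).foldl fspStep (f, some prev, psf)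
        = (f ++ tailStr prev psf rest, some (lastSt prev rest), psf ++ rest.map pvAct) := by
  induction rest with
  | nil => intro j f prev psf hj; simp [PySem.List.enumerate, tailStr, lastSt]
  | cons s r ih =>
      intro j f prev psf hj
      rw [PySem.List.enumerate_cons, List.foldl_cons]
      have hne : (j == 0) = false := by simp; omega
      simp only [fspStep, hne]
      rw [if_neg (by simp : ¬ (false = true))]
      rw [ih (j + 1) _ _ _ (by omega)]
      simp [tailStr, lastSt, segStr, stOf, pvAct, pvSt, pyOptStr, String.append_assoc]

theorem mapB (steps : List String) :
    ∀ (u : List String) (j : Nat), 1 ≤ j → steps.drop j = u → ∀ (tl : String),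
      PySem.Str.join ""
        (((PySem.List.pyRange (j : Int) (steps.length : Int) 1).map (fun i =>
          " | Taking action '" ++ (PySem.List.pyGetD (steps.map pvAct) i "" ++ ("' from state " ++
            (PySem.List.pyGetD (steps.map stOf) (i - 1) "" ++ (" | Moved to state " ++
            (PySem.List.pyGetD (steps.map stOf) i "" ++ (" | Plan so far " ++
            pyListRepr (PySem.List.slice (steps.map pvAct) (some 1) (some (i + 1))))))))))) ++ [tl])
      = tailStr ((steps.map stOf).getD (j - 1) "") (((steps.map pvAct).drop 1).take (j - 1)) u ++ tl := by
  intro u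
  induction u with
  | nil =>
      intro j hj hd tl
      have hlen : steps.length ≤ j := by
        by_contra hc
        exact absurd hd (by simp [List.drop_eq_nil_iff]; omega)
      rw [PySem.List.pyRange_one_eq_nil (by exact_mod_cast hlen)]
      rw [List.map_nil, List.nil_append, join_empty_cons]
      simp [PySem.Str.join, PySem.Chars.join_nil, tailStr]
  | cons s u' ih =>
      intro j hj hd tl
      have hjlt : j < steps.length := by
        by_contra hc
        rw [List.drop_eq_nil_iff.mpr (by omega)] at hd; exact (List.cons_ne_nil s u') hd.symm
      have hstep : steps[j]? = some s := by
        have h0 : (steps.drop j)[0]? = some s := by rw [hd]; rfl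
        simpa using h0
      have hact : (steps.map pvAct)[j]? = some (pvAct s) := by
        simp [List.getElem?_map, hstep]
      have hst : (steps.map stOf)[j]? = some (stOf s) := by
        simp [List.getElem?_map, hstep]
      have hdrop' : steps.drop (j + 1) = u' := by
        have h1 : (steps.drop j).drop 1 = u' := by rw [hd]; rfl
        simpa [List.drop_drop, Nat.add_comm] using h1
      rw [PySem.List.pyRange_one_cons (by exact_mod_cast hjlt), List.map_cons, List.cons_append,
          join_empty_cons]
      have hcast1 : (j : Int) - 1 = ((j - 1 : Nat) : Int) := by omega
      have hcast2 : (j : Int) + 1 = ((j + 1 : Nat) : Int) := by omega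
      rw [hcast1, hcast2, ih (j + 1) (by omega) hdrop' tl]
      have hidx : ((steps.map pvAct).drop 1)[j - 1]? = some (pvAct s) := by
        rw [List.getElem?_drop, show 1 + (j - 1) = j by omega, hact]
      have htake : ((steps.map pvAct).drop 1).take j
          = ((steps.map pvAct).drop 1).take (j - 1) ++ [pvAct s] := by
        rw [show j = (j - 1) + 1 by omega, List.take_add_one, hidx]
        rfl
      have hslice : PySem.List.slice (steps.map pvAct) (some 1) (some ((j + 1 : Nat) : Int))
          = ((steps.map pvAct).drop 1).take (j - 1) ++ [pvAct s] := by
        rw [PySem.List.slice_toNat (steps.map pvAct) Int.one_nonneg (Int.natCast_nonneg _)]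
        simp only [Int.toNat_one, Int.toNat_natCast, Nat.add_sub_cancel]
        exact htake
      have hgetD : ∀ (l : List String) (k : Nat) (x : String), l[k]? = some x → l.getD k "" = x := by
        intro l k x hx; rw [List.getD_eq_getElem?_getD, hx]; rfl
      rw [tailStr]
      simp only [PySem.List.pyGetD_natCast, hgetD _ _ _ hact, hgetD _ _ _ hst,
        Nat.add_sub_cancel, hslice, htake, segStr, String.append_assoc]

theorem pyGetD_map_neg_one (s0 : String) :
    ∀ (rest : List String),
      PySem.List.pyGetD ((s0 :: rest).map stOf) (-1) "" = lastSt (stOf s0) rest := by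
  intro rest
  induction rest generalizing s0 with
  | nil =>
      rw [List.map_cons, List.map_nil,
        PySem.List.pyGetD_neg_one _ "" (List.cons_ne_nil _ _)]
      simp [lastSt]
  | cons s r ih =>
      rw [List.map_cons, PySem.List.pyGetD_neg_one _ "" (List.cons_ne_nil _ _),
        List.getLast_cons (by simp)]
      rw [← PySem.List.pyGetD_neg_one ((s :: r).map stOf) "" (by simp), ih s]
      simp [lastSt]

theorem zip_map_self {α β γ : Type} (f : α → β) (g : α × β → γ) (l : List α) :
    (l.zip (l.map f)).map g = l.map (fun a => g (a, f a)) := by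
  induction l with
  | nil => rfl
  | cons x xs ih => simp [ih]

theorem plan_so_far_nil : (" | Plan so far " ++ pyListRepr [] : String) = " | Plan so far []" := by
  decide

-- ===== VERDICT (by name: the statement is the Claim_ definition above) =====
theorem format_system1_plan_spec : Claim_equal_format_system1_plan := by
  intro plan _
  unfold Spec_format_system1_plan
  obtain ⟨s0, rest, hsteps⟩ : ∃ s0 rest, pySplit plan " | " = s0 :: rest := by
    cases h : pySplit plan " | " with
    | nil => exact absurd h (pySplit_ne_nil plan " | " (by decide))
    | cons a l => exact ⟨a, l, rfl⟩
  simp only [format_system1_plan, format_system1_plan_alt, hsteps]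
  rw [zip_map_self pvAct pvSt (s0 :: rest),
      show (fun a => pvSt (a, pvAct a)) = stOf from funext (fun _ => rfl)]
  rw [PySem.List.enumerate_cons, List.foldl_cons]
  have h0 : fspStep ("", none, ([] : List String)) ((0 : Int), s0)
      = ("" ++ ("Moved to state " ++ (stOf s0 ++ (" | Plan so far " ++ pyListRepr []))),
         some (stOf s0), []) := by
    simp [fspStep, stOf, pvAct, pvSt]
  rw [h0, show ((0 : Int) + 1) = 1 by norm_num, foldA rest 1 _ (stOf s0) [] (by norm_num)]
  -- B side: peel off the first segment of the join, then apply mapB at j = 1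
  rw [List.cons_append, join_empty_cons]
  have hfirst0 : PySem.List.pyGetD ((s0 :: rest).map stOf) 0 "" = stOf s0 := by
    rw [List.map_cons, PySem.List.pyGetD_zero_cons]
  rw [hfirst0, pyGetD_map_neg_one s0 rest]
  have hB := mapB (s0 :: rest) rest 1 (le_refl 1) rfl
    (" | Goal state " ++ (lastSt (stOf s0) rest ++ " reached!"))
  rw [show ((1 : Nat) : Int) = (1 : Int) by norm_num] at hB
  rw [hB]
  simp only [Nat.sub_self, List.map_cons, List.getD_cons_zero, List.drop_succ_cons,
    List.drop_zero, List.take_zero, pyOptStr]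
  simp only [String.empty_append, ← String.append_assoc, plan_so_far_nil]
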